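-- pv_equiv track=rewrite | github.com/YOOOOONA/algorithm_study | [프로그래머스]타겟넘버.py | resort
-- ===== SOURCE A (Python) =====
-- from heapq import heappush,heappop
--
-- def resort(heapq):
--     #이미정렬돼있는 heapq
--     q = [heappop(heapq),]
--     while(heapq):
--         pr,v,cnt = heappop(heapq)##[0,1,1], [0,-1,1]// [0,2,cnt]  [0,-1-1]//[5,3,cnt+cnt2]  ans+=cnt+cnt2
--         if q[-1][0]==pr and q[-1][1]==v:####복붙하다가 1아니라 0으로 인덱스 줘서 틀렸었음
--             q[-1][2]+=cnt
--         else: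
--             q.append([pr,v,cnt])
--     return q
-- ===== SOURCE B (Python) =====
-- from heapq import heappop
--
-- def resort(heapq):
--     # Loop fission: drain the heap completely first (emptying the argument like
--     # the original), then group adjacent entries with equal (pr, v) in a second
--     # pass that carries a pending run (key, total) instead of mutating the last
--     # appended group in place.
--     entries = [heappop(heapq)]
--     while heapq:
--         entries.append(heappop(heapq))
--     pr, v, cnt = entries[0]
--     key, total = (pr, v), cnt
--     out = []
--     for pr, v, cnt in entries[1:]:
--         if (pr, v) == key:
--             total += cnt
--         else:
--             out.append([key[0], key[1], total])
--             key, total = (pr, v), cnt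
--     out.append([key[0], key[1], total])
--     return out
-- ===== Notes on version B (the rewrite author's own statement) =====
-- stated objective: alternative
-- what changed: B splits A's fused pop-and-merge loop into two phases: drain the heap completely first, then a grouping pass that carries a pending (key, total) run and appends each finished group exactly once, instead of re-reading and mutating the last appended group in place.
-- outside the precondition, e.g. on resort([[1, 2]]): A returns [[1, 2]], B raises ValueError
import Mathlib
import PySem

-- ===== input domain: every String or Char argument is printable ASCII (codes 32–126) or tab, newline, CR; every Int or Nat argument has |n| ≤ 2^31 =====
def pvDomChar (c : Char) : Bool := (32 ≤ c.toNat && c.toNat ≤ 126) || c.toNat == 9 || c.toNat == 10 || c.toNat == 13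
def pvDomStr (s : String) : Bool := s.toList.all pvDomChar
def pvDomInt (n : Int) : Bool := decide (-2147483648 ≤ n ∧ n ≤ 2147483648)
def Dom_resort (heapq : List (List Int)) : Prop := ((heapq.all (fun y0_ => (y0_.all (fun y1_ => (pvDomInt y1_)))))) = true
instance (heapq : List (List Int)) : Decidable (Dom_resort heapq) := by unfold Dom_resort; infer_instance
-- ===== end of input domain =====

-- B changes the decomposition only (loop fission + a pending-run accumulator); equivalence is
-- about the return value — both A and B empty the argument list in place via heappop.

-- ===== shared library helper: CPython's heapq.heappop, transcribed step for step =====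
-- Python list comparison `a < b` (lexicographic) on List Int
def pyLt : List Int → List Int → Bool
  | [], [] => false
  | [], _ :: _ => true
  | _ :: _, [] => false
  | x :: xs, y :: ys => if x < y then true else if y < x then false else pyLt xs ys

-- the while-loop of CPython _siftup (walks down to a leaf); fuel ≥ endpos suffices
def siftupLoop (endpos : Nat) : Nat → Nat → List (List Int) → (List (List Int) × Nat)
  | 0, pos, heap => (heap, pos)
  | fuel + 1, pos, heap =>
    let childpos := 2 * pos + 1
    if childpos < endpos then
      let rightpos := childpos + 1
      let childpos :=
        if rightpos < endpos ∧ ¬ pyLt (heap.getD childpos []) (heap.getD rightpos []) then rightpos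
        else childpos
      siftupLoop endpos fuel childpos (heap.set pos (heap.getD childpos []))
    else (heap, pos)

-- the while-loop of CPython _siftdown (sifts newitem back up)
def siftdownLoop (startpos : Nat) (newitem : List Int) : Nat → Nat → List (List Int) → (List (List Int) × Nat)
  | 0, pos, heap => (heap, pos)
  | fuel + 1, pos, heap =>
    if startpos < pos then
      let parentpos := (pos - 1) / 2
      let parent := heap.getD parentpos []
      if pyLt newitem parent then siftdownLoop startpos newitem fuel parentpos (heap.set pos parent)
      else (heap, pos)
    else (heap, pos)

-- CPython _siftup(heap, 0) (which ends by calling _siftdown(heap, 0, pos))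
def siftup0 (heap : List (List Int)) : List (List Int) :=
  let endpos := heap.length
  let newitem := heap.getD 0 []
  let p1 := siftupLoop endpos endpos 0 heap
  let heap1 := p1.1.set p1.2 newitem
  let p2 := siftdownLoop 0 newitem heap1.length p1.2 heap1
  p2.1.set p2.2 newitem

-- heappop: none = IndexError on an empty heap; otherwise (popped item, remaining heap)
def heappopA (h : List (List Int)) : Option (List Int × List (List Int)) :=
  match h.getLast? with
  | none => none
  | some lastelt =>
    match h.dropLast with
    | [] => some (lastelt, [])
    | rest@(_ :: _) => some (rest.getD 0 [], siftup0 (rest.set 0 lastelt))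

-- ===== PORT A =====
-- one merge step of A's loop body (q[-1] comparison with short-circuit `and`, in-place update of q[-1][2]);
-- the branches Python only reaches by raising (bad q[-1]) are junk and lie outside Pre_
def mergeStep (q : List (List Int)) (pr v cnt : Int) : List (List Int) :=
  match q.getLast? with
  | some (a :: rest) =>
    if a = pr then
      match rest with
      | b :: rest2 =>
        if b = v then
          match rest2 with
          | c :: rest3 => q.dropLast ++ [a :: b :: (c + cnt) :: rest3]
          | [] => q                                   -- Python raises IndexError here
        else q ++ [[pr, v, cnt]]
      | [] => q                                       -- Python raises IndexError here
    else q ++ [[pr, v, cnt]]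
  | _ => q                                            -- unreachable while the loop runs (q is nonempty)

-- A's while loop; fuel = remaining heap size (each heappop shrinks the heap by one)
def resortGo : Nat → List (List Int) → List (List Int) → List (List Int)
  | 0, _, q => q
  | fuel + 1, h, q =>
    match heappopA h with
    | none => q
    | some (e, h') =>
      match e with
      | [pr, v, cnt] => resortGo fuel h' (mergeStep q pr v cnt)
      | _ => resortGo fuel h' q                       -- Python raises ValueError (unpack); outside Pre_

def resort (heapq : List (List Int)) : List (List Int) :=
  match heappopA heapq with
  | none => []                                        -- Python raises IndexError; outside Pre_
  | some (e, h') => resortGo h'.length h' [e]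

-- ===== PORT B =====
-- phase 1 of B: drain the heap into the list of popped entries, in pop order
def drainGo : Nat → List (List Int) → List (List Int)
  | 0, _ => []
  | fuel + 1, h =>
    match heappopA h with
    | none => []
    | some (e, h') => e :: drainGo fuel h'

-- phase 2 of B: grouping pass carrying the pending run (k1, k2, total); each finished group is appended once
def groupGo : List (List Int) → Int → Int → Int → List (List Int) → List (List Int)
  | [], k1, k2, total, out => out ++ [[k1, k2, total]]
  | e :: rest, k1, k2, total, out =>
    match e with
    | [pr, v, cnt] =>
      if pr = k1 ∧ v = k2 then groupGo rest k1 k2 (total + cnt) out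
      else groupGo rest pr v cnt (out ++ [[k1, k2, total]])
    | _ => groupGo rest k1 k2 total out                -- Python raises ValueError (unpack); outside Pre_

def resort_alt (heapq : List (List Int)) : List (List Int) :=
  match heappopA heapq with
  | none => []                                        -- Python raises IndexError; outside Pre_
  | some (e, h') =>
    match e with
    | [pr, v, cnt] => groupGo (drainGo h'.length h') pr v cnt []
    | _ => []                                         -- Python raises ValueError (unpack); outside Pre_

-- ===== PRECONDITION & SPEC =====
-- Pre_ excludes the empty list (A raises IndexError) and lists containing an entry whose length
-- is not 3: there A usually raises ValueError at unpacking, but in degenerate cases (e.g. a single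
-- malformed entry, or a malformed first-popped entry that is never unpacked) A returns the entry
-- unexamined while B unpacks every entry and raises.
def Pre_resort (heapq : List (List Int)) : Prop :=
  heapq ≠ [] ∧ ∀ x ∈ heapq, x.length = 3
instance (heapq : List (List Int)) : Decidable (Pre_resort heapq) := by unfold Pre_resort; infer_instance

def pvWitness_resort : List (List Int) := [[0, 1, 1], [0, 2, 3], [0, 1, 2]]

def Spec_resort (heapq : List (List Int)) (out : List (List Int)) : Prop := out = resort_alt heapq
instance (heapq : List (List Int)) (out : List (List Int)) : Decidable (Spec_resort heapq out) := by unfold Spec_resort; infer_instance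

-- ===== CLAIM (what is proved, stated in full; the proofs are below) =====
def Claim_equal_resort : Prop := ∀ (heapq : List (List Int)), Dom_resort heapq → Pre_resort heapq → Spec_resort heapq (resort heapq)

-- ===== LEMMAS AND PROOFS =====

-- the loop-fission lemma: A's fused loop over the heap equals B's grouping pass over the drained
-- entry list, for every fuel/heap and every accumulator shaped as out ++ [[k1,k2,t]]
lemma resortGo_eq_groupGo (fuel : Nat) :
    ∀ (h : List (List Int)) (out : List (List Int)) (k1 k2 t : Int),
      resortGo fuel h (out ++ [[k1, k2, t]]) = groupGo (drainGo fuel h) k1 k2 t out := by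
  induction fuel with
  | zero => intro h out k1 k2 t; simp [resortGo, drainGo, groupGo]
  | succ n ih =>
    intro h out k1 k2 t
    simp only [resortGo, drainGo]
    cases hp : heappopA h with
    | none => simp [groupGo]
    | some p =>
      obtain ⟨e, h'⟩ := p
      match e with
      | [] | [_] | [_, _] | _ :: _ :: _ :: _ :: _ =>
        simp [groupGo, ih]
      | [pr, v, cnt] =>
        simp only [groupGo]
        by_cases hk : pr = k1 ∧ v = k2
        · obtain ⟨h1, h2⟩ := hk
          subst h1; subst h2
          have : mergeStep (out ++ [[pr, v, t]]) pr v cnt = out ++ [[pr, v, t + cnt]] := by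
            simp [mergeStep]
          rw [this, ih]
          simp
        · have : mergeStep (out ++ [[k1, k2, t]]) pr v cnt
              = (out ++ [[k1, k2, t]]) ++ [[pr, v, cnt]] := by
            simp only [mergeStep, List.getLast?_concat]
            by_cases h1 : k1 = pr
            · subst h1
              have h2 : ¬ k2 = v := fun h2 => hk ⟨rfl, h2.symm⟩
              simp [h2]
            · simp [h1]
          rw [this, ih]
          simp [hk]

-- the first popped entry is the head of the heap (or its only element), hence an element of it
lemma heappopA_fst_mem (h : List (List Int)) (e : List Int) (h' : List (List Int))
    (hp : heappopA h = some (e, h')) : e ∈ h := by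
  unfold heappopA at hp
  cases hl : h.getLast? with
  | none => simp [hl] at hp
  | some lastelt =>
    rw [hl] at hp
    cases hd : h.dropLast with
    | nil =>
      rw [hd] at hp
      simp only [Option.some.injEq, Prod.mk.injEq] at hp
      exact hp.1 ▸ List.mem_of_getLast? hl
    | cons a rest =>
      rw [hd] at hp
      simp only [Option.some.injEq, Prod.mk.injEq] at hp
      have he : a = e := by simpa using hp.1
      subst he
      have : a ∈ h.dropLast := by rw [hd]; exact List.mem_cons_self
      exact List.mem_of_mem_dropLast this

-- ===== VERDICT (by name: the statement is the Claim_ definition above) =====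
theorem resort_spec : Claim_equal_resort := by
  intro heapq _ hpre
  unfold Spec_resort resort resort_alt
  cases hp : heappopA heapq with
  | none =>
    exfalso
    obtain ⟨hne, _⟩ := hpre
    unfold heappopA at hp
    cases hl : heapq.getLast? with
    | none => exact hne (List.getLast?_eq_none_iff.mp hl)
    | some x =>
      rw [hl] at hp
      cases hd : heapq.dropLast <;> rw [hd] at hp <;> simp at hp
  | some p =>
    obtain ⟨e, h'⟩ := p
    have hmem : e ∈ heapq := heappopA_fst_mem heapq e h' hp
    have hlen : e.length = 3 := hpre.2 e hmem
    match e, hlen with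
    | [pr, v, cnt], _ =>
      simpa using resortGo_eq_groupGo h'.length h' [] pr v cnt
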